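-- pv_equiv track=rewrite | github.com/ghyathmoussa/SiteAble | src/core/severity.py | summarize_by_severity
-- ===== SOURCE A (Python) =====
-- from typing import Any, Dict, List, Optional
--
-- CRITICAL = "critical"  # Blocks access for users with disabilities
--
-- MAJOR = "major"  # Significant barrier to accessibility
--
-- MINOR = "minor"  # Usability issue, but workarounds exist
--
-- def summarize_by_severity(issues: List[Dict[str, Any]]) -> Dict[str, int]:
--     """Summarize issues by severity level.
--
--     Args:
--         issues: List of issue dicts (should be enriched first)
--
--     Returns:
--         Dict with counts per severity level
--     """
--     counts = {CRITICAL: 0, MAJOR: 0, MINOR: 0}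
--     for issue in issues:
--         severity = issue.get("severity", MINOR)
--         if severity in counts:
--             counts[severity] += 1
--         else:
--             counts[MINOR] += 1
--     return counts
-- ===== SOURCE B (Python) =====
-- from typing import Any, Dict, List
--
-- CRITICAL = "critical"
-- MAJOR = "major"
-- MINOR = "minor"
--
-- def summarize_by_severity(issues: List[Dict[str, Any]]) -> Dict[str, int]:
--     """Count critical and major directly; minor is the arithmetic remainder
--     (unknown or missing severities all land in minor)."""
--     c = sum(1 for issue in issues if issue.get("severity", MINOR) == CRITICAL)
--     m = sum(1 for issue in issues if issue.get("severity", MINOR) == MAJOR)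
--     return {CRITICAL: c, MAJOR: m, MINOR: len(issues) - c - m}
-- ===== Notes on version B (the rewrite author's own statement) =====
-- stated objective: alternative
-- what changed: Instead of classifying each issue into a mutable counts dict (with a membership test and an else-bucket), B counts critical and major issues with two targeted passes and derives the minor count arithmetically as len(issues) minus those two, since every issue falls into exactly one bucket.
import Mathlib
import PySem

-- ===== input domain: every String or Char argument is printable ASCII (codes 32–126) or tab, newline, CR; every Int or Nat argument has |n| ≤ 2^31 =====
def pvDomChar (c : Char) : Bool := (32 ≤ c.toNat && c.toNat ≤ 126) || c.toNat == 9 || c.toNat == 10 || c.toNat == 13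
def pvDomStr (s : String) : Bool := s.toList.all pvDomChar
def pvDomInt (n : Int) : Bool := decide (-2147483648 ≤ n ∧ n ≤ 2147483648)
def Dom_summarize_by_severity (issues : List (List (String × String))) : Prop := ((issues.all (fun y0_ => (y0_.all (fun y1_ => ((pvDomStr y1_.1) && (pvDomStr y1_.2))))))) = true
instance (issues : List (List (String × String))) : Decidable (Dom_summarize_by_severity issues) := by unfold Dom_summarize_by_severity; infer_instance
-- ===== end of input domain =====

-- B replaces A's single classify-and-increment loop over a counts dict by two direct counts
-- (critical, major) and computes the minor count as len(issues) minus those two (alternative decomposition).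

-- ===== PORT A =====
def summarize_by_severity (issues : List (List (String × String))) : List (String × Int) :=
  let counts : PySem.Dict String Int := ⟨[("critical", 0), ("major", 0), ("minor", 0)]⟩
  (issues.foldl (fun counts issue =>
      let severity := (PySem.Dict.mk issue).getD "severity" "minor"
      if counts.contains severity then counts.modify severity 0 (· + 1)
      else counts.modify "minor" 0 (· + 1)) counts).items

-- ===== PORT B =====
def summarize_by_severity_alt (issues : List (List (String × String))) : List (String × Int) :=
  let c : Int := (issues.countP
      (fun issue => (PySem.Dict.mk issue).getD "severity" "minor" == "critical") : Nat)
  let m : Int := (issues.countP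
      (fun issue => (PySem.Dict.mk issue).getD "severity" "minor" == "major") : Nat)
  [("critical", c), ("major", m), ("minor", (issues.length : Int) - c - m)]

-- ===== PRECONDITION & SPEC =====
def Spec_summarize_by_severity (issues : List (List (String × String))) (out : List (String × Int)) : Prop := out = summarize_by_severity_alt issues
instance (issues : List (List (String × String))) (out : List (String × Int)) : Decidable (Spec_summarize_by_severity issues out) := by unfold Spec_summarize_by_severity; infer_instance

-- ===== CLAIM (what is proved, stated in full; the proofs are below) =====
def Claim_equal_summarize_by_severity : Prop := ∀ (issues : List (List (String × String))), Dom_summarize_by_severity issues → Spec_summarize_by_severity issues (summarize_by_severity issues)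

-- ===== LEMMAS AND PROOFS =====

-- the severity A reads from an issue
def pvSev (issue : List (String × String)) : String :=
  (PySem.Dict.mk issue).getD "severity" "minor"

-- invariant of A's loop: the counts dict keeps its three fixed keys, each accumulating its count
def pvD3 (a b c : Int) : PySem.Dict String Int :=
  ⟨[("critical", a), ("major", b), ("minor", c)]⟩

lemma pv_step (i : List (String × String)) (a b c : Int) :
    (if (pvD3 a b c).contains ((PySem.Dict.mk i).getD "severity" "minor")
     then (pvD3 a b c).modify ((PySem.Dict.mk i).getD "severity" "minor") 0 (· + 1)
     else (pvD3 a b c).modify "minor" 0 (· + 1)) =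
    (if pvSev i = "critical" then pvD3 (a + 1) b c
     else if pvSev i = "major" then pvD3 a (b + 1) c
     else pvD3 a b (c + 1)) := by
  rw [show (PySem.Dict.mk i).getD "severity" "minor" = pvSev i from rfl]
  by_cases h1 : pvSev i = "critical"
  · simp [h1, pvD3, PySem.Dict.contains, PySem.Dict.modify, PySem.Dict.insert,
      PySem.Dict.getD, PySem.Dict.get?]
    try ring
  · by_cases h2 : pvSev i = "major"
    · simp [h2, pvD3, PySem.Dict.contains, PySem.Dict.modify, PySem.Dict.insert,
        PySem.Dict.getD, PySem.Dict.get?]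
      try ring
    · by_cases h3 : pvSev i = "minor"
      · simp [h3, pvD3, PySem.Dict.contains, PySem.Dict.modify, PySem.Dict.insert,
          PySem.Dict.getD, PySem.Dict.get?]
        try ring
      · rw [if_neg (by simp [pvD3, PySem.Dict.contains, Ne.symm h1, Ne.symm h2, Ne.symm h3])]
        simp [h1, h2, pvD3, PySem.Dict.contains, PySem.Dict.modify, PySem.Dict.insert,
          PySem.Dict.getD, PySem.Dict.get?]
        try ring

lemma pv_inv (issues : List (List (String × String))) : ∀ (a b c : Int),
    issues.foldl (fun counts issue =>
        if counts.contains ((PySem.Dict.mk issue).getD "severity" "minor")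
        then counts.modify ((PySem.Dict.mk issue).getD "severity" "minor") 0 (· + 1)
        else counts.modify "minor" 0 (· + 1))
      (pvD3 a b c) =
    pvD3 (a + (issues.countP (fun i => pvSev i == "critical") : Int))
         (b + (issues.countP (fun i => pvSev i == "major") : Int))
         (c + (issues.countP
            (fun i => !(pvSev i == "critical") && !(pvSev i == "major")) : Int)) := by
  induction issues with
  | nil => intro a b c; simp
  | cons i is ih =>
    intro a b c
    rw [List.foldl_cons, pv_step i a b c]
    by_cases h1 : pvSev i = "critical"
    · rw [if_pos h1, ih]
      simp [h1]; ring_nf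
    · by_cases h2 : pvSev i = "major"
      · rw [if_neg h1, if_pos h2, ih]
        simp [h2]; ring_nf
      · rw [if_neg h1, if_neg h2, ih]
        simp [h1, h2]; ring_nf

-- the three counts partition the list
lemma pv_partition (issues : List (List (String × String))) :
    (issues.countP (fun i => !(pvSev i == "critical") && !(pvSev i == "major")) : Int) =
    (issues.length : Int) - (issues.countP (fun i => pvSev i == "critical") : Int)
      - (issues.countP (fun i => pvSev i == "major") : Int) := by
  induction issues with
  | nil => simp
  | cons i is ih =>
    simp only [List.countP_cons, List.length_cons]
    by_cases h1 : pvSev i = "critical" <;> by_cases h2 : pvSev i = "major" <;>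
      simp [h1, h2] at * <;> omega

-- ===== VERDICT (by name: the statement is the Claim_ definition above) =====
theorem summarize_by_severity_spec : Claim_equal_summarize_by_severity := by
  intro issues _
  simp only [Spec_summarize_by_severity, summarize_by_severity, summarize_by_severity_alt]
  rw [show (⟨[("critical", 0), ("major", 0), ("minor", 0)]⟩ : PySem.Dict String Int) =
      pvD3 0 0 0 from rfl, pv_inv issues 0 0 0]
  simp only [pvD3, pv_partition]
  simp [pvSev]
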